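/-
  H0 – H6 OF INVARIANTS §3.8: WHAT vorbis_deinit WALKS, and `DeinitOK`.

  vorbis_deinit performs NO store (H6: its 248 instructions contain none besides five pushes); it LOADS every pointer it passes to
  `setup_free` (a no-op in arena mode) and DEREFERENCES exactly five of them: `comment_list`, `residue_config`, `r.classdata`,
  `codebooks`, `mapping`. `DeinitOK` says those five are what they must be. It holds after vorbis_init and at EVERY return of
  start_decoder, the error returns included — where `ArenaOK` is NOT available and not needed (DECISIONS D-16).

      ZeroRange mem a lo hi    the bytes `[a + lo, a + hi)` are 0        `.u32 off …  : mem.u32 (a + off) = 0`, `.ptr`, `.i32` …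
      H0 mem f                 the state after vorbis_init: all 1808 bytes 0 except `alloc` (16 bytes), `temp_offset` (= L),
                               `page_crc_tests` (= −1).   H0s: the same after open_memory's five stream stores (`[48, 80)`)
      H1 … H5                  H1 = CM2, H2 = R2-or-NULL, H3 = R9, H4 = CB0, H5 = MP1-or-NULL, in the form vorbis_deinit needs
                               (CONTRACTS.md, vorbis_deinit, PRE-D), over the block predicate `Blk` (Vorbis/Blocks.lean)
      DeinitOK Blk mem f       OB1 ∧ `alloc_buffer ≠ 0` ∧ H1 – H5            (INVARIANTS §4)
      DeinitOK.of_null         … from "the five pointers are NULL / the length is 0" (so: from H0; and at an error return of a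
                               section of start_decoder, from the groups complete so far + the zero rest)
      DeinitOK.site_*          USE: the 14 check sites of vorbis_deinit that are not inside `*f` (the 27 inside: `OB1.site`);
                               each takes `hL : BlkLive Blk Live` and returns a `Site Live a n`
      DeinitOK.wins / .Owns / .transfer    the two-address lemma behind FRAME and TRANSPORT: the nine fields of `(mem', f)` have
                               the values of those of `(mem, p)`, the two blocks whose CONTENT is read (`residue_config`,
                               `codebooks`) are `Kept`, the owned blocks are still allocated
      DeinitOK.frame           … same object, `ObjSame`                  DeinitOK.agree   … `AllKept Blk mem mem'`
      DeinitOK.moves           `Group.Moves`: through `*f = p`          DeinitOK.carries   `Group.Carries`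
  H6 ("no store during deinit") is a fact about the code, not a predicate: with it, `DeinitOK.agree` with the `AllKept` of pushes
  outside every allocated block (`AgreeOn.allKept`) carries `DeinitOK` (and everything else) through the whole function.
-/
import Vorbis.State.Copied
namespace Vorbis
open X86 X86.User Asan

/-! ### Zero ranges (the state vorbis_init's memset leaves) -/

/-- The bytes `[a + lo, a + hi)` are 0. -/
def ZeroRange (mem : Mem) (a lo hi : Nat) : Prop :=
  ∀ o, lo ≤ o → o < hi → mem.read (addr (a + o)) = 0

namespace ZeroRange
variable {mem mem' : Mem} {a lo hi : Nat}

/-- A smaller range. -/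
theorem mono (h : ZeroRange mem a lo hi) {lo' hi' : Nat} (h1 : lo ≤ lo') (h2 : hi' ≤ hi) : ZeroRange mem a lo' hi' :=
  fun o ho1 ho2 => h o (by omega) (by omega)

/-- A read of `k` zero bytes at offset `off`. -/
theorem readLE (h : ZeroRange mem a lo hi) (off k : Nat) (h1 : lo ≤ off) (h2 : off + k ≤ hi) :
    mem.readLE (addr (a + off)) k = 0 := by
  apply readLE_addr_zero
  intro i hi'
  rw [Nat.add_assoc]
  exact h (off + i) (by omega) (by omega)

theorem u8 (h : ZeroRange mem a lo hi) (off : Nat) (h1 : lo ≤ off) (h2 : off + 1 ≤ hi) : mem.u8 (a + off) = 0 :=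
  h.readLE off 1 h1 h2
theorem u16 (h : ZeroRange mem a lo hi) (off : Nat) (h1 : lo ≤ off) (h2 : off + 2 ≤ hi) : mem.u16 (a + off) = 0 :=
  h.readLE off 2 h1 h2
theorem u32 (h : ZeroRange mem a lo hi) (off : Nat) (h1 : lo ≤ off) (h2 : off + 4 ≤ hi) : mem.u32 (a + off) = 0 :=
  h.readLE off 4 h1 h2
theorem u64 (h : ZeroRange mem a lo hi) (off : Nat) (h1 : lo ≤ off) (h2 : off + 8 ≤ hi) : mem.u64 (a + off) = 0 :=
  h.readLE off 8 h1 h2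
theorem ptr (h : ZeroRange mem a lo hi) (off : Nat) (h1 : lo ≤ off) (h2 : off + 8 ≤ hi) : mem.ptr (a + off) = 0 :=
  h.u64 off h1 h2
theorem i8 (h : ZeroRange mem a lo hi) (off : Nat) (h1 : lo ≤ off) (h2 : off + 1 ≤ hi) : mem.i8 (a + off) = 0 := by
  rw [Mem.i8_def, h.u8 off h1 h2]
  rfl
theorem i16 (h : ZeroRange mem a lo hi) (off : Nat) (h1 : lo ≤ off) (h2 : off + 2 ≤ hi) : mem.i16 (a + off) = 0 := by
  rw [Mem.i16_def, h.u16 off h1 h2]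
  rfl
theorem i32 (h : ZeroRange mem a lo hi) (off : Nat) (h1 : lo ≤ off) (h2 : off + 4 ≤ hi) : mem.i32 (a + off) = 0 := by
  rw [Mem.i32_def, h.u32 off h1 h2]
  rfl

/-- **FRAME**: the range is still zero when its bytes read the same. -/
theorem frame (h : ZeroRange mem a lo hi) (he : Mem.EqOn (a + lo) (a + hi) mem mem') (ha : a + hi ≤ 2 ^ 64) :
    ZeroRange mem' a lo hi := by
  intro o h1 h2
  have e := toNat_addr (a + o) (by omega)
  rw [he (addr (a + o)) (by omega) (by omega)]
  exact h o h1 h2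

/-- The range follows a byte copy. -/
theorem copied {p f n : Nat} (h : ZeroRange mem p lo hi) (hc : Copied mem p mem' f n) (hn : hi ≤ n) :
    ZeroRange mem' f lo hi := by
  intro o h1 h2
  rw [hc o (by omega)]
  exact h o h1 h2

end ZeroRange

/-! ### H0 -/

/-- **H0: the state after vorbis_init** — `memset(p, 0, 1808)`, then `p->alloc = *z` with the length rounded down to a multiple
of 8, `temp_offset = L`, `page_crc_tests = −1`. Hence every pointer of `*f` is NULL and every count is 0. -/
structure H0 (mem : Mem) (f : Nat) : Prop where
  z0 : ZeroRange mem f 0 Off.stb_vorbis.alloc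
  z1 : ZeroRange mem f Off.stb_vorbis.setup_offset Off.stb_vorbis.temp_offset
  z2 : ZeroRange mem f Off.stb_vorbis.eof Off.stb_vorbis.page_crc_tests
  z3 : ZeroRange mem f Off.stb_vorbis.channel_buffer_start Off.sizeof.stb_vorbis
  temp : stb_vorbis.temp_offset mem f = stb_vorbis.alloc.alloc_buffer_length_in_bytes mem f
  crc : stb_vorbis.page_crc_tests mem f = -1

/-- **H0 after the five stream stores of stb_vorbis_open_memory** (`stream`, `stream_start`, `stream_end`, `stream_len`,
`push_mode`: the bytes `[48, 80)`): the zero part of point P3. -/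
structure H0s (mem : Mem) (f : Nat) : Prop where
  z0 : ZeroRange mem f 0 Off.stb_vorbis.stream
  z0' : ZeroRange mem f Off.stb_vorbis.first_audio_page_offset Off.stb_vorbis.alloc
  z1 : ZeroRange mem f Off.stb_vorbis.setup_offset Off.stb_vorbis.temp_offset
  z2 : ZeroRange mem f Off.stb_vorbis.eof Off.stb_vorbis.page_crc_tests
  z3 : ZeroRange mem f Off.stb_vorbis.channel_buffer_start Off.sizeof.stb_vorbis
  temp : stb_vorbis.temp_offset mem f = stb_vorbis.alloc.alloc_buffer_length_in_bytes mem f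
  crc : stb_vorbis.page_crc_tests mem f = -1

/-- H0 minus the stream fields. -/
theorem H0.toH0s {mem : Mem} {f : Nat} (h : H0 mem f) : H0s mem f := by
  obtain ⟨z0, z1, z2, z3, ht, hc⟩ := h
  simp only [voff] at z0
  refine ⟨?_, ?_, z1, z2, z3, ht, hc⟩
  · simp only [voff]
    exact z0.mono (by omega) (by omega)
  · simp only [voff]
    exact z0.mono (by omega) (by omega)

/-- **The zero rest of `*f` inside start_decoder**: every byte from offset `lo` up to the paging fields (`serial`, offset 1480) is
still 0 — the fields that the sections of start_decoder not yet run will assign (`H0rest` of CONTRACTS.md, notes of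
start_decoder). `lo` = the offset of the first field the NEXT section writes. -/
def RestZero (mem : Mem) (f lo : Nat) : Prop := ZeroRange mem f lo Off.stb_vorbis.serial

/-- After `H0s` the rest is zero from the first setup field on (the two arena offsets and `eof`, `error` excepted: from 136). -/
theorem H0s.restZero {mem : Mem} {f : Nat} (h : H0s mem f) : RestZero mem f Off.stb_vorbis.eof := by
  have := h.z2
  unfold RestZero
  simp only [voff] at this ⊢
  exact this.mono (by omega) (by omega)

/-! ### H1 – H5 -/

/-- **H1 (= CM2 in the form deinit needs)**: `comment_list_length ≤ 0`, or `comment_list` is an allocated block of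
`8·comment_list_length` bytes. vorbis_deinit loads `comment_list[i]` for `i < comment_list_length` WITHOUT a NULL test of
`comment_list` (the BUG that FIX 2 closes). The words' values are irrelevant (they go to `setup_free`). -/
def H1 (Blk : Block → Prop) (mem : Mem) (f : Nat) : Prop :=
  stb_vorbis.comment_list_length mem f ≤ 0 ∨
    Blk ⟨stb_vorbis.comment_list mem f, 8 * (stb_vorbis.comment_list_length mem f).toNat⟩

/-- **H2 (= R2-or-NULL)**: `residue_config = NULL`, or an allocated block of `32·residue_count` bytes, `residue_count ≤ 64`. -/
def H2 (Blk : Block → Prop) (mem : Mem) (f : Nat) : Prop :=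
  stb_vorbis.residue_config mem f = 0 ∨
    (stb_vorbis.residue_count mem f ≤ 64 ∧
      Blk ⟨stb_vorbis.residue_config mem f, 32 * (stb_vorbis.residue_count mem f).toNat⟩)

/-- **H3 (= R9)**: for every residue `i < residue_count` whose `classdata ≠ NULL`: `codebooks ≠ NULL`,
`classbook < codebook_count`, and `classdata` is an allocated block of `8·E` bytes, `E = codebooks[classbook].entries`
(`E ≤ 0`: nothing is read). Holds at every return of start_decoder: `classbook` is stored BEFORE its range test, `classdata` after;
`entries` is never rewritten after the codebook loop. -/
def H3 (Blk : Block → Prop) (mem : Mem) (f : Nat) : Prop :=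
  stb_vorbis.residue_config mem f ≠ 0 → ∀ i : Nat, (i : Int) < stb_vorbis.residue_count mem f →
    Residue.classdata mem (stb_vorbis.residue_config_at mem f i) ≠ 0 →
      stb_vorbis.codebooks mem f ≠ 0 ∧
      (Residue.classbook mem (stb_vorbis.residue_config_at mem f i) : Int) < stb_vorbis.codebook_count mem f ∧
      Blk ⟨Residue.classdata mem (stb_vorbis.residue_config_at mem f i),
        8 * (Codebook.entries mem (stb_vorbis.codebooks_at mem f
          (Residue.classbook mem (stb_vorbis.residue_config_at mem f i)))).toNat⟩

/-- **H4 (= CB0)**: `codebooks = NULL`, or an allocated block of `2120·codebook_count` bytes, `codebook_count ≤ 256`. -/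
def H4 (Blk : Block → Prop) (mem : Mem) (f : Nat) : Prop :=
  stb_vorbis.codebooks mem f = 0 ∨
    (stb_vorbis.codebook_count mem f ≤ 256 ∧
      Blk ⟨stb_vorbis.codebooks mem f, Off.sizeof.Codebook * (stb_vorbis.codebook_count mem f).toNat⟩)

/-- **H5 (= MP1-or-NULL)**: `mapping = NULL`, or an allocated block of `56·mapping_count` bytes (stride 56: FIX 8),
`mapping_count ≤ 64`. -/
def H5 (Blk : Block → Prop) (mem : Mem) (f : Nat) : Prop :=
  stb_vorbis.mapping mem f = 0 ∨
    (stb_vorbis.mapping_count mem f ≤ 64 ∧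
      Blk ⟨stb_vorbis.mapping mem f, Off.sizeof.Mapping * (stb_vorbis.mapping_count mem f).toNat⟩)

/-- **`DeinitOK f`**: all that vorbis_deinit and stb_vorbis_close need (INVARIANTS §4; `VorbisOK ⇒ DeinitOK`). `buffer`
(`alloc_buffer ≠ 0`) only makes the `free` arm of `setup_free` unreachable; `free` is a bare `ret`, so safety does not need it. -/
structure DeinitOK (Blk : Block → Prop) (mem : Mem) (f : Nat) : Prop where
  ob1 : OB1 Blk f
  buffer : stb_vorbis.alloc.alloc_buffer mem f ≠ 0
  h1 : H1 Blk mem f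
  h2 : H2 Blk mem f
  h3 : H3 Blk mem f
  h4 : H4 Blk mem f
  h5 : H5 Blk mem f

/-! ### Establishing `DeinitOK`: the NULL forms -/

/-- H1 from `comment_list_length = 0` (H0; FIX 2's reset on both failure paths). -/
theorem H1.of_zero {Blk : Block → Prop} {mem : Mem} {f : Nat} (h : stb_vorbis.comment_list_length mem f = 0) :
    H1 Blk mem f := by
  unfold H1
  omega

/-- H2 from `residue_config = NULL`. -/
theorem H2.of_null {Blk : Block → Prop} {mem : Mem} {f : Nat} (h : stb_vorbis.residue_config mem f = 0) : H2 Blk mem f :=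
  Or.inl h

/-- H3 from `residue_config = NULL` (nothing to walk). -/
theorem H3.of_null {Blk : Block → Prop} {mem : Mem} {f : Nat} (h : stb_vorbis.residue_config mem f = 0) : H3 Blk mem f :=
  fun hne => absurd h hne

/-- H3 from `residue_count ≤ 0` (the loop runs zero times). -/
theorem H3.of_count {Blk : Block → Prop} {mem : Mem} {f : Nat} (h : stb_vorbis.residue_count mem f ≤ 0) : H3 Blk mem f := by
  intro _ i hi
  omega

/-- H4 from `codebooks = NULL`. -/
theorem H4.of_null {Blk : Block → Prop} {mem : Mem} {f : Nat} (h : stb_vorbis.codebooks mem f = 0) : H4 Blk mem f :=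
  Or.inl h

/-- H5 from `mapping = NULL`. -/
theorem H5.of_null {Blk : Block → Prop} {mem : Mem} {f : Nat} (h : stb_vorbis.mapping mem f = 0) : H5 Blk mem f :=
  Or.inl h

/-- `residue_config` and `mapping` are NULL while the rest is zero from `residue_count` (offset 320) on. -/
theorem RestZero.residue_null {mem : Mem} {f lo : Nat} (h : RestZero mem f lo) (hlo : lo ≤ Off.stb_vorbis.residue_count) :
    stb_vorbis.residue_config mem f = 0 ∧ stb_vorbis.mapping mem f = 0 := by
  unfold RestZero at h
  simp only [voff] at h hlo
  simp only [vacc, voff]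
  exact ⟨h.u64 456 (by omega) (by omega), h.u64 472 (by omega) (by omega)⟩

/-- `mapping` is NULL while the rest is zero from `mapping_count` (offset 464) on. -/
theorem RestZero.mapping_null {mem : Mem} {f lo : Nat} (h : RestZero mem f lo) (hlo : lo ≤ Off.stb_vorbis.mapping_count) :
    stb_vorbis.mapping mem f = 0 := by
  unfold RestZero at h
  simp only [voff] at h hlo
  simp only [vacc, voff]
  exact h.u64 472 (by omega) (by omega)

/-- `codebooks` is NULL while the rest is zero from `codebook_count` (offset 160) on. -/
theorem RestZero.codebooks_null {mem : Mem} {f lo : Nat} (h : RestZero mem f lo) (hlo : lo ≤ Off.stb_vorbis.codebook_count) :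
    stb_vorbis.codebooks mem f = 0 := by
  unfold RestZero at h
  simp only [voff] at h hlo
  simp only [vacc, voff]
  exact h.u64 168 (by omega) (by omega)

/-- **`DeinitOK` from the NULL forms**: the length is 0 and the four pointers are NULL. -/
theorem DeinitOK.of_null {Blk : Block → Prop} {mem : Mem} {f : Nat} (hob : OB1 Blk f)
    (hbuf : stb_vorbis.alloc.alloc_buffer mem f ≠ 0) (h1 : stb_vorbis.comment_list_length mem f = 0)
    (h2 : stb_vorbis.residue_config mem f = 0) (h4 : stb_vorbis.codebooks mem f = 0) (h5 : stb_vorbis.mapping mem f = 0) :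
    DeinitOK Blk mem f :=
  ⟨hob, hbuf, H1.of_zero h1, H2.of_null h2, H3.of_null h2, H4.of_null h4, H5.of_null h5⟩

/-- **`DeinitOK` right after vorbis_init** (and after the five stream stores): H0 is the base case of H1 – H5. -/
theorem H0s.deinitOK {Blk : Block → Prop} {mem : Mem} {f : Nat} (h : H0s mem f) (hob : OB1 Blk f)
    (hbuf : stb_vorbis.alloc.alloc_buffer mem f ≠ 0) : DeinitOK Blk mem f := by
  have hr := h.restZero
  have hz := h.z0
  simp only [voff] at hz
  apply DeinitOK.of_null hob hbuf
  · simp only [vacc, voff]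
    exact hz.i32 32 (by omega) (by omega)
  · exact (hr.residue_null (by simp only [voff]; omega)).1
  · exact hr.codebooks_null (by simp only [voff]; omega)
  · exact hr.mapping_null (by simp only [voff]; omega)

/-! ### USE: the check sites of vorbis_deinit outside `*f` -/

namespace DeinitOK
variable {Blk Blk' : Block → Prop} {Live : Nat → Prop} {mem mem' : Mem} {f p a : Nat}

/-- **`comment_list[i]`, `i < comment_list_length`** (load8 at `comment_list + 8·i`; site 0x1075ff): by H1. -/
theorem site_comment (h : DeinitOK Blk mem f) (hL : BlkLive Blk Live) (i : Nat)
    (hi : (i : Int) < stb_vorbis.comment_list_length mem f) (ha : a = stb_vorbis.comment_list_at mem f i) :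
    Site Live a 8 := by
  subst ha
  cases h.h1 with
  | inl hle => omega
  | inr hB =>
    simp only [vacc, voff] at hi hB ⊢
    exact Site.of_blk hL hB (by dsimp only; omega) (by dsimp only; omega) (by omega)

/-- **A field of `residue_config[i]`, `i < residue_count`** (`classdata` +16, `classbook` +13, `residue_books` +24): by H2. -/
theorem site_residue (h : DeinitOK Blk mem f) (hL : BlkLive Blk Live) (hnz : stb_vorbis.residue_config mem f ≠ 0) (i : Nat)
    (hi : (i : Int) < stb_vorbis.residue_count mem f) (off n : Nat) (hin : off + n ≤ Off.sizeof.Residue) (hn : 1 ≤ n)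
    (ha : a = stb_vorbis.residue_config_at mem f i + off) : Site Live a n := by
  subst ha
  cases h.h2 with
  | inl hz => exact absurd hz hnz
  | inr hB =>
    obtain ⟨_, hB⟩ := hB
    simp only [vacc, voff] at hi hin hB ⊢
    exact Site.of_blk hL hB (by dsimp only; omega) (by dsimp only; omega) hn

/-- **A field of `codebooks[i]`, `i < codebook_count`** (the five pointer fields at +8, +32, +40, +2096, +2104; `entries` +4 of
`codebooks[classbook]`): by H4. -/
theorem site_codebook (h : DeinitOK Blk mem f) (hL : BlkLive Blk Live) (hnz : stb_vorbis.codebooks mem f ≠ 0) (i : Nat)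
    (hi : (i : Int) < stb_vorbis.codebook_count mem f) (off n : Nat) (hin : off + n ≤ Off.sizeof.Codebook) (hn : 1 ≤ n)
    (ha : a = stb_vorbis.codebooks_at mem f i + off) : Site Live a n := by
  subst ha
  cases h.h4 with
  | inl hz => exact absurd hz hnz
  | inr hB =>
    obtain ⟨_, hB⟩ := hB
    simp only [vacc, voff] at hi hin hB ⊢
    exact Site.of_blk hL hB (by dsimp only; omega) (by dsimp only; omega) hn

/-- **A field of `mapping[i]`, `i < mapping_count`** (`chan` +8; stride 56): by H5. -/
theorem site_mapping (h : DeinitOK Blk mem f) (hL : BlkLive Blk Live) (hnz : stb_vorbis.mapping mem f ≠ 0) (i : Nat)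
    (hi : (i : Int) < stb_vorbis.mapping_count mem f) (off n : Nat) (hin : off + n ≤ Off.sizeof.Mapping) (hn : 1 ≤ n)
    (ha : a = stb_vorbis.mapping_at mem f i + off) : Site Live a n := by
  subst ha
  cases h.h5 with
  | inl hz => exact absurd hz hnz
  | inr hB =>
    obtain ⟨_, hB⟩ := hB
    simp only [vacc, voff] at hi hin hB ⊢
    exact Site.of_blk hL hB (by dsimp only; omega) (by dsimp only; omega) hn

/-- **`codebooks[r->classbook].entries`** for a residue with `classdata ≠ NULL` (load4, site 0x1076bc): by H3 + H4 — the only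
two-object step of vorbis_deinit. -/
theorem site_entries (h : DeinitOK Blk mem f) (hL : BlkLive Blk Live) (hnz : stb_vorbis.residue_config mem f ≠ 0) (i : Nat)
    (hi : (i : Int) < stb_vorbis.residue_count mem f)
    (hcd : Residue.classdata mem (stb_vorbis.residue_config_at mem f i) ≠ 0)
    (ha : a = stb_vorbis.codebooks_at mem f (Residue.classbook mem (stb_vorbis.residue_config_at mem f i))
      + Off.Codebook.entries) : Site Live a 4 := by
  obtain ⟨hcb, hlt, _⟩ := h.h3 hnz i hi hcd
  exact h.site_codebook hL hcb _ hlt _ 4 (by simp only [voff]; omega) (by omega) ha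

/-- **`classdata[j]`, `j < E = codebooks[classbook].entries`** (load8 at `classdata + 8·j`; site 0x107676): by H3. -/
theorem site_classdata (h : DeinitOK Blk mem f) (hL : BlkLive Blk Live) (hnz : stb_vorbis.residue_config mem f ≠ 0) (i : Nat)
    (hi : (i : Int) < stb_vorbis.residue_count mem f)
    (hcd : Residue.classdata mem (stb_vorbis.residue_config_at mem f i) ≠ 0) (j : Nat)
    (hj : (j : Int) < Codebook.entries mem (stb_vorbis.codebooks_at mem f
      (Residue.classbook mem (stb_vorbis.residue_config_at mem f i))))
    (ha : a = Residue.classdata_at mem (stb_vorbis.residue_config_at mem f i) j) : Site Live a 8 := by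
  subst ha
  obtain ⟨_, _, hB⟩ := h.h3 hnz i hi hcd
  simp only [vacc, voff] at hj hB ⊢
  exact Site.of_blk hL hB (by dsimp only; omega) (by dsimp only; omega) (by omega)

end DeinitOK

/-! ### FRAME and TRANSPORT: one generic lemma -/

/-- The windows of `*f` that `DeinitOK` reads: `comment_list_length`, `comment_list`; `alloc_buffer`; `codebook_count`,
`codebooks`; `residue_count`; `residue_config`, `mapping_count`, `mapping`. -/
def DeinitOK.wins : Wins := [(32, 48), (112, 120), (160, 176), (320, 324), (456, 480)]

/-- The windows are these nine fields. -/
example : DeinitOK.wins = [(Off.stb_vorbis.comment_list_length, Off.stb_vorbis.comment_list + 8),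
    (Off.stb_vorbis.alloc.alloc_buffer, Off.stb_vorbis.alloc.alloc_buffer + 8),
    (Off.stb_vorbis.codebook_count, Off.stb_vorbis.codebooks + 8),
    (Off.stb_vorbis.residue_count, Off.stb_vorbis.residue_count + 4),
    (Off.stb_vorbis.residue_config, Off.stb_vorbis.mapping + 8)] := by
  simp only [voff, DeinitOK.wins]

/-- **The blocks `DeinitOK` mentions**: the comment table, the residue records, every `classdata` table, the codebooks, the
mappings. -/
inductive DeinitOK.Owns (mem : Mem) (f : Nat) : Block → Prop
  /-- `Block(comment_list, 8·comment_list_length)` (H1) -/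
  | comments : DeinitOK.Owns mem f ⟨stb_vorbis.comment_list mem f, 8 * (stb_vorbis.comment_list_length mem f).toNat⟩
  /-- `Block(residue_config, 32·residue_count)` (H2) -/
  | residues : DeinitOK.Owns mem f ⟨stb_vorbis.residue_config mem f, 32 * (stb_vorbis.residue_count mem f).toNat⟩
  /-- `Block(classdata_i, 8·E_i)` (H3) -/
  | classdata (i : Nat) : DeinitOK.Owns mem f ⟨Residue.classdata mem (stb_vorbis.residue_config_at mem f i),
      8 * (Codebook.entries mem (stb_vorbis.codebooks_at mem f
        (Residue.classbook mem (stb_vorbis.residue_config_at mem f i)))).toNat⟩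
  /-- `Block(codebooks, 2120·codebook_count)` (H4) -/
  | codebooks : DeinitOK.Owns mem f
      ⟨stb_vorbis.codebooks mem f, Off.sizeof.Codebook * (stb_vorbis.codebook_count mem f).toNat⟩
  /-- `Block(mapping, 56·mapping_count)` (H5) -/
  | mappings : DeinitOK.Owns mem f ⟨stb_vorbis.mapping mem f, Off.sizeof.Mapping * (stb_vorbis.mapping_count mem f).toNat⟩

/-- **THE TWO-ADDRESS LEMMA of `DeinitOK`** (FRAME and TRANSPORT are instances): the nine fields of `(mem', f)` have the values of
those of `(mem, p)`; the two blocks whose CONTENT `DeinitOK` reads — `residue_config` (`classdata`, `classbook` of each residue)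
and `codebooks` (`entries` of a class book) — are kept; the blocks it mentions are still allocated; OB1 holds at the new place.
The other three blocks (`comment_list`, `mapping`, each `classdata`) are only required to be allocated: their contents are loaded
and passed to `setup_free`, never used. -/
theorem DeinitOK.transfer {Blk Blk' : Block → Prop} {mem mem' : Mem} {p f : Nat} (h : DeinitOK Blk mem p)
    (he : ObjEq DeinitOK.wins mem p mem' f) (hob : OB1 Blk' f)
    (hres : stb_vorbis.residue_config mem p ≠ 0 →
      (Block.mk (stb_vorbis.residue_config mem p) (32 * (stb_vorbis.residue_count mem p).toNat)).Kept mem mem')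
    (hcb : stb_vorbis.codebooks mem p ≠ 0 →
      (Block.mk (stb_vorbis.codebooks mem p) (Off.sizeof.Codebook * (stb_vorbis.codebook_count mem p).toNat)).Kept mem mem')
    (hB : ∀ B, DeinitOK.Owns mem p B → Blk B → Blk' B) : DeinitOK Blk' mem' f := by
  obtain ⟨_, hbuf, h1, h2, h3, h4, h5⟩ := h
  have ebuf : stb_vorbis.alloc.alloc_buffer mem' f = stb_vorbis.alloc.alloc_buffer mem p := by
    simp only [vacc, voff]
    exact he.u64 112 (by decide)
  have ecll : stb_vorbis.comment_list_length mem' f = stb_vorbis.comment_list_length mem p := by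
    simp only [vacc, voff]
    exact he.i32 32 (by decide)
  have ecl : stb_vorbis.comment_list mem' f = stb_vorbis.comment_list mem p := by
    simp only [vacc, voff]
    exact he.u64 40 (by decide)
  have ecbc : stb_vorbis.codebook_count mem' f = stb_vorbis.codebook_count mem p := by
    simp only [vacc, voff]
    exact he.i32 160 (by decide)
  have ecbs : stb_vorbis.codebooks mem' f = stb_vorbis.codebooks mem p := by
    simp only [vacc, voff]
    exact he.u64 168 (by decide)
  have erc : stb_vorbis.residue_count mem' f = stb_vorbis.residue_count mem p := by
    simp only [vacc, voff]
    exact he.i32 320 (by decide)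
  have ercfg : stb_vorbis.residue_config mem' f = stb_vorbis.residue_config mem p := by
    simp only [vacc, voff]
    exact he.u64 456 (by decide)
  have emc : stb_vorbis.mapping_count mem' f = stb_vorbis.mapping_count mem p := by
    simp only [vacc, voff]
    exact he.i32 464 (by decide)
  have emp : stb_vorbis.mapping mem' f = stb_vorbis.mapping mem p := by
    simp only [vacc, voff]
    exact he.u64 472 (by decide)
  refine ⟨hob, ?_, ?_, ?_, ?_, ?_, ?_⟩
  · rw [ebuf]
    exact hbuf
  · unfold H1 at *
    rw [ecll, ecl]
    cases h1 with
    | inl h => exact Or.inl h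
    | inr h => exact Or.inr (hB _ DeinitOK.Owns.comments h)
  · unfold H2 at *
    rw [erc, ercfg]
    cases h2 with
    | inl h => exact Or.inl h
    | inr h => exact Or.inr ⟨h.1, hB _ DeinitOK.Owns.residues h.2⟩
  · -- H3: the one clause that reads CONTENT of two blocks
    have hown := fun i => hB _ (DeinitOK.Owns.classdata (mem := mem) (f := p) i)
    unfold H3 at *
    unfold H2 at h2
    unfold H4 at h4
    simp only [vacc, voff] at h2 h3 h4 hres hcb ecbc ecbs erc ercfg hown ⊢
    rw [ercfg, erc, ecbs, ecbc]
    intro hnz i hi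
    -- the residue record `i` lies in the residue block, which is kept
    have hs2 := hres hnz
    have hin2 := hs2.inside
    dsimp only at hin2
    have e16 := hs2.u64 (mem.u64 (p + 456) + 32 * i + 16) (by dsimp only; omega) (by dsimp only; omega)
    have e13 := hs2.u8 (mem.u64 (p + 456) + 32 * i + 13) (by dsimp only; omega) (by dsimp only; omega)
    rw [e16, e13]
    intro hcd
    obtain ⟨g1, g2, g3⟩ := h3 hnz i hi hcd
    refine ⟨g1, g2, ?_⟩
    -- the class book lies in the codebooks block, which is kept
    have hs4 := hcb g1
    have e4 := hs4.i32 (mem.u64 (p + 168) + 2120 * mem.u8 (mem.u64 (p + 456) + 32 * i + 13) + 4)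
      (by dsimp only; omega) (by dsimp only; omega)
    rw [e4]
    exact hown i g3
  · unfold H4 at *
    rw [ecbc, ecbs]
    cases h4 with
    | inl h => exact Or.inl h
    | inr h => exact Or.inr ⟨h.1, hB _ DeinitOK.Owns.codebooks h.2⟩
  · unfold H5 at *
    rw [emc, emp]
    cases h5 with
    | inl h => exact Or.inl h
    | inr h => exact Or.inr ⟨h.1, hB _ DeinitOK.Owns.mappings h.2⟩

/-- **FRAME**: `DeinitOK` survives a change of memory that leaves `*f` (up to the arena offsets) and the two content blocks alone. -/
theorem DeinitOK.frame {Blk : Block → Prop} {mem mem' : Mem} {f : Nat} (h : DeinitOK Blk mem f)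
    (hobj : ObjSame f mem mem')
    (hres : stb_vorbis.residue_config mem f ≠ 0 →
      (Block.mk (stb_vorbis.residue_config mem f) (32 * (stb_vorbis.residue_count mem f).toNat)).Kept mem mem')
    (hcb : stb_vorbis.codebooks mem f ≠ 0 →
      (Block.mk (stb_vorbis.codebooks mem f) (Off.sizeof.Codebook * (stb_vorbis.codebook_count mem f).toNat)).Kept mem mem') :
    DeinitOK Blk mem' f :=
  h.transfer (hobj.sub (by decide)) h.ob1 hres hcb (fun _ _ hb => hb)

/-- **FRAME, coarse form**: every allocated block is kept (every push of vorbis_deinit and of its callees: H6), no block was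
freed. `DeinitOK` is `Group.Carries`. -/
theorem DeinitOK.carries : Group.Carries DeinitOK := by
  intro Blk Blk' mem mem' f ha hB _ h
  have hk := ha _ h.ob1.blk
  apply h.transfer (ObjEq.of_same hk.same hk.inside (by decide)) (h.ob1.mono hB)
  · intro hnz
    cases h.h2 with
    | inl hz => exact absurd hz hnz
    | inr hb => exact ha _ hb.2
  · intro hnz
    cases h.h4 with
    | inl hz => exact absurd hz hnz
    | inr hb => exact ha _ hb.2
  · intro B _ hb
    exact hB B hb

/-- The same for one block predicate. -/
theorem DeinitOK.agree {Blk : Block → Prop} {mem mem' : Mem} {f : Nat} (h : DeinitOK Blk mem f) (ha : AllKept Blk mem mem') :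
    DeinitOK Blk mem' f :=
  DeinitOK.carries Blk Blk mem mem' f ha (fun _ hb => hb) h.ob1.blk h

/-- **TRANSPORT**: `DeinitOK` follows the object through `*f = p`. -/
theorem DeinitOK.moves : Group.Moves DeinitOK := by
  intro Blk Blk' mem mem' p f hm h
  apply h.transfer (hm.objEq (by decide)) hm.ob1
  · intro hnz
    cases h.h2 with
    | inl hz => exact absurd hz hnz
    | inr hb => exact hm.kept hb.2
  · intro hnz
    cases h.h4 with
    | inl hz => exact absurd hz hnz
    | inr hb => exact hm.kept hb.2
  · intro B _ hb
    exact hm.sub B hb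

end Vorbis
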